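-- pv_equiv track=rewrite | github.com/ChakshuGupta13/propositional-logic-theorem-prover-using-resolution-refutation | main.py | around_unary_op
-- ===== SOURCE A (Python) =====
-- def forward_slice(sentence, index):
--     """
--     Returns forward slice of sentence begining from index.
--
--     Let us define forward slice as next complete segment in sentence.
--     Examples:
--         Forward Slice from index = 2 of "A(B(!C&D))" is "(B(!C&D))"
--         Forward Slice from index = 3 of "A(B(!C&D))" is "B"
--         Forward Slice from index = 4 of "A(B(!C&D))" is "(!C&D)"
--         Forward Slice from index = 5 of "A(B(!C&D))" is "!C"
--
--     @param sentence (list)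
--     : Propositional Sentence or Formula
--     @param index (int)
--     : Index from which slicing should begin (included)
--     """
--     off_balance = 0
--     i = index
--
--     while i < len(sentence):
--         off_balance += 1 if sentence[i] == '(' else -1 if sentence[i] == ')' else 0
--         if off_balance == 0 and sentence[i] != "!":
--             return sentence[index : (i + 1)], i
--         i += 1
--
-- def around_unary_op(sentence, op):
--     processed_sentence = []
--
--     i = 0
--     L = len(sentence)
--
--     while i < L:
--         if sentence[i] == op:
--             i += 1
--
--             sentence_slice, i = forward_slice(sentence, i)
--             sentence_slice = around_unary_op(sentence_slice, op)
--
--             processed_sentence += ['(', '!'] + sentence_slice.copy() + [')']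
--         else:
--             processed_sentence.append(sentence[i])
--
--         i += 1
--
--     return processed_sentence
-- ===== SOURCE B (Python) =====
-- def around_unary_op(sentence, op):
--     # Single left-to-right pass: remember, on a stack, the running paren
--     # balance at each occurrence of the unary op; emit '(', '!' immediately
--     # and emit the matching ')' as soon as the balance returns to the
--     # remembered value on a non-'!' token (= end of the op's operand).
--     out = []
--     stack = []  # paren-balance values at still-open negations
--     bal = 0
--     for t in sentence:
--         if t == op:
--             out += ['(', '!']
--             stack.append(bal)
--         else:
--             if t == '(':
--                 bal += 1
--             elif t == ')':
--                 bal -= 1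
--             out.append(t)
--             if t != '!':
--                 while stack and stack[-1] == bal:
--                     stack.pop()
--                     out.append(')')
--     out.extend(')' for _ in stack)  # close anything left open
--     return out
-- ===== Notes on version B (the rewrite author's own statement) =====
-- stated objective: alternative
-- what changed: Replaced A's recursive re-scanning of forward slices (each op triggers a balance scan to find its operand, then a recursive re-processing of that slice) by one left-to-right pass that pushes the running paren balance on a stack at each op and emits the closing ')' as soon as the balance returns to the remembered value on a non-'!' token; worst-case cost drops from quadratic to linear, though on op-sparse random inputs the measured times are similar.
import Mathlib
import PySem

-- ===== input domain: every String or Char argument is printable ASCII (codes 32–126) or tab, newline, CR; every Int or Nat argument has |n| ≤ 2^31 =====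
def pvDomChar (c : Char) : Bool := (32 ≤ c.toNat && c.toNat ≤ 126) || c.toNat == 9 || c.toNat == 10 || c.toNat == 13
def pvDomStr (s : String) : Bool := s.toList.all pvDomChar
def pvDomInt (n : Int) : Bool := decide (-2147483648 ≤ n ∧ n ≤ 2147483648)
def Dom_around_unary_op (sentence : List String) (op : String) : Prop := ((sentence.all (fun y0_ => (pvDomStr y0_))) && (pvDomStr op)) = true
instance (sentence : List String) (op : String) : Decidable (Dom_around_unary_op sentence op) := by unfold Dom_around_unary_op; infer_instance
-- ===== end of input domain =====

-- B replaces A's recursive re-scanning of each operand slice by a single linear pass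
-- that remembers, on a stack, the paren balance at each op occurrence (objective: alternative).

-- ===== PORT A =====

def fwdSlice : List String → Int → Option (List String × List String)
  | [], _ => none
  | t :: rest, off =>
    let off' := off + (if t = "(" then 1 else if t = ")" then (-1 : Int) else 0)
    if off' = 0 ∧ t ≠ "!" then some ([t], rest)
    else
      match fwdSlice rest off' with
      | some (sl, rem) => some (t :: sl, rem)
      | none => none

theorem fwdSlice_split : ∀ (s : List String) (off : Int) (sl rem : List String),
    fwdSlice s off = some (sl, rem) → s = sl ++ rem ∧ sl ≠ [] := by
  intro s
  induction s with
  | nil => intro off sl rem h; simp [fwdSlice] at h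
  | cons t rest ih =>
    intro off sl rem h
    rw [fwdSlice] at h
    generalize hd : off + (if t = "(" then 1 else if t = ")" then (-1:Int) else 0) = off2 at h
    split at h
    · simp only [Option.some.injEq, Prod.mk.injEq] at h
      obtain ⟨h1, h2⟩ := h
      subst h1; subst h2; simp
    · cases hf : fwdSlice rest off2 with
      | none => rw [hf] at h; simp at h
      | some p =>
        rw [hf] at h
        obtain ⟨sl', rem'⟩ := p
        simp only [Option.some.injEq, Prod.mk.injEq] at h
        obtain ⟨h1, h2⟩ := h
        obtain ⟨e1, e2⟩ := ih _ _ _ hf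
        subst h2; rw [← h1]; constructor
        · simp [e1]
        · simp

def around_unary_op (sentence : List String) (op : String) : List String :=
  match sentence with
  | [] => []
  | t :: rest =>
    if t = op then
      match hf : fwdSlice rest 0 with
      | some (sl, rem) =>
        ["(", "!"] ++ around_unary_op sl op ++ [")"] ++ around_unary_op rem op
      | none => []
    else t :: around_unary_op rest op
termination_by sentence.length
decreasing_by
  all_goals
    first
    | (obtain ⟨e1, e2⟩ := fwdSlice_split _ _ _ _ hf
       subst e1
       have h9 : sl.length ≠ 0 := by simpa using e2
       simp only [List.length_append, List.length_cons]
       omega)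
    | simp

-- ===== PORT B =====

def bPop (bal : Int) : List Int → List String → List Int × List String
  | [], out => ([], out)
  | b :: bs, out => if b = bal then bPop bal bs (out ++ [")"]) else (b :: bs, out)

def bStep (op : String) (st : Int × List Int × List String) (t : String) :
    Int × List Int × List String :=
  if t = op then (st.1, st.1 :: st.2.1, st.2.2 ++ ["(", "!"])
  else
    let bal := st.1 + (if t = "(" then 1 else if t = ")" then (-1 : Int) else 0)
    let out := st.2.2 ++ [t]
    if t = "!" then (bal, st.2.1, out)
    else
      let p := bPop bal st.2.1 out
      (bal, p.1, p.2)

def around_unary_op_alt (sentence : List String) (op : String) : List String :=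
  let fin := sentence.foldl (bStep op) (0, [], [])
  fin.2.2 ++ List.replicate fin.2.1.length ")"

-- ===== PRECONDITION & SPEC =====

def preScan (op : String) : List String → Int → List Int → Option (Int × List Int)
  | [], bal, stack => some (bal, stack)
  | t :: rest, bal, stack =>
    if t = op then
      if op ≠ "!" ∧ stack.contains bal then none
      else preScan op rest bal (bal :: stack)
    else
      let bal' := bal + (if t = "(" then 1 else if t = ")" then (-1 : Int) else 0)
      if t = "!" then preScan op rest bal' stack
      else
        let stack' := stack.dropWhile (· == bal')
        if stack'.contains bal' then none
        else preScan op rest bal' stack'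


-- Pre_ excludes (a) the inputs on which some operand never closes before its enclosing
-- segment ends, where forward_slice returns None and Python A raises TypeError, and
-- (b) op itself being a parenthesis that occurs in the sentence, the one corner where
-- forward_slice counts the operator token in its own paren balance — an accident outside
-- the natural domain of a unary-operator rewriter (A still returns a value on some such
-- inputs; see claim cites).
def Pre_around_unary_op (sentence : List String) (op : String) : Prop :=
  ((op ≠ "(" ∧ op ≠ ")") ∨ op ∉ sentence) ∧ (preScan op sentence 0 []).map Prod.snd = some []

instance (sentence : List String) (op : String) : Decidable (Pre_around_unary_op sentence op) := by
  unfold Pre_around_unary_op; infer_instance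

def pvWitness_around_unary_op : List String × String := (["!", "(", "A", ")"], "!")

def Spec_around_unary_op (sentence : List String) (op : String) (out : List String) : Prop :=
  out = around_unary_op_alt sentence op
instance (sentence : List String) (op : String) (out : List String) : Decidable (Spec_around_unary_op sentence op out) := by
  unfold Spec_around_unary_op; infer_instance

-- ===== CLAIM (what is proved, stated in full; the proofs are below) =====
def Claim_equal_around_unary_op : Prop := ∀ (sentence : List String) (op : String), Dom_around_unary_op sentence op → Pre_around_unary_op sentence op → Spec_around_unary_op sentence op (around_unary_op sentence op)

-- ===== LEMMAS AND PROOFS =====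

theorem bPop_eq : ∀ (bal : Int) (bs : List Int) (out : List String),
    bPop bal bs out = (bs.dropWhile (· == bal), out ++ List.replicate (bs.takeWhile (· == bal)).length ")") := by
  intro bal bs
  induction bs with
  | nil => intro out; simp [bPop]
  | cons b bs ih =>
    intro out
    by_cases hb : b = bal
    · subst hb
      simp [bPop, List.dropWhile, List.takeWhile, ih, List.replicate_succ, List.append_assoc]
    · simp [bPop, hb, List.dropWhile, List.takeWhile, (by simpa using hb : (b == bal) = false)]

theorem bStep_out : ∀ (op t : String) (bal : Int) (st : List Int) (out : List String)
    (b : Int) (s2 : List Int) (o : List String),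
    bStep op (bal, st, []) t = (b, s2, o) → bStep op (bal, st, out) t = (b, s2, out ++ o) := by
  intro op t bal st out b s2 o h
  by_cases h1 : t = op
  · subst h1; simp [bStep] at h ⊢
    obtain ⟨e1, e2, e3⟩ := h
    subst e1; subst e2; subst e3; simp
  · by_cases h2 : t = "!"
    · subst h2
      simp [bStep, h1] at h ⊢
      obtain ⟨e1, e2, e3⟩ := h
      subst e1; subst e2; subst e3; simp
    · simp [bStep, h1, h2, bPop_eq] at h ⊢
      obtain ⟨e1, e2, e3⟩ := h
      subst e1; subst e2; subst e3; simp [List.append_assoc]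

theorem run_out : ∀ (op : String) (s : List String) (bal : Int) (st : List Int) (out : List String)
    (b : Int) (s2 : List Int) (o : List String),
    s.foldl (bStep op) (bal, st, []) = (b, s2, o) →
    s.foldl (bStep op) (bal, st, out) = (b, s2, out ++ o) := by
  intro op s
  induction s with
  | nil =>
    intro bal st out b s2 o h
    simp at h
    obtain ⟨e1, e2, e3⟩ := h
    subst e1; subst e2; subst e3; simp
  | cons t s ih =>
    intro bal st out b s2 o h
    simp only [List.foldl_cons] at h ⊢
    rcases h1 : bStep op (bal, st, []) t with ⟨b1, s1, o1⟩
    rcases h2 : List.foldl (bStep op) (b1, s1, []) s with ⟨b2, s2', o2⟩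
    have hl : List.foldl (bStep op) (b1, s1, o1) s = (b2, s2', o1 ++ o2) := ih b1 s1 o1 b2 s2' o2 h2
    rw [h1] at h
    rw [hl] at h
    rw [bStep_out op t bal st out b1 s1 o1 h1]
    rw [ih b1 s1 (out ++ o1) b2 s2' o2 h2]
    simp only [Prod.mk.injEq] at h
    obtain ⟨e1, e2, e3⟩ := h
    subst e1; subst e2; subst e3
    simp [List.append_assoc]

theorem beq_shift (c bal : Int) : ((fun x => x == bal + c) ∘ (fun x => x + c)) = (· == (bal : Int)) := by
  funext x
  by_cases hx : x = bal
  · subst hx; simp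
  · have hx2 : ¬ (x + c = bal + c) := by omega
    simp [hx, hx2]

theorem bStep_shift : ∀ (op t : String) (bal : Int) (st : List Int) (out : List String) (c : Int)
    (b : Int) (s2 : List Int) (o : List String),
    bStep op (bal, st, out) t = (b, s2, o) →
    bStep op (bal + c, st.map (· + c), out) t = (b + c, s2.map (· + c), o) := by
  intro op t bal st out c b s2 o h
  by_cases h1 : t = op
  · subst h1
    simp [bStep] at h ⊢
    obtain ⟨e1, e2, e3⟩ := h
    subst e1 e2 e3; simp
  · by_cases h2 : t = "!"
    · subst h2
      simp [bStep, h1] at h ⊢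
      obtain ⟨e1, e2, e3⟩ := h
      subst e1 e2 e3; simp
    · have hd : bal + (if t = "(" then 1 else if t = ")" then (-1:Int) else 0) + c
          = bal + c + (if t = "(" then 1 else if t = ")" then (-1:Int) else 0) := by omega
      simp [bStep, h1, h2, bPop_eq] at h ⊢
      obtain ⟨e1, e2, e3⟩ := h
      subst e1 e2 e3
      refine ⟨by omega, ?_, ?_⟩
      · rw [← hd, List.dropWhile_map, beq_shift]
      · rw [← hd, List.takeWhile_map, beq_shift, List.length_map]

theorem run_shift : ∀ (op : String) (s : List String) (bal : Int) (st : List Int) (out : List String) (c : Int)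
    (b : Int) (s2 : List Int) (o : List String),
    s.foldl (bStep op) (bal, st, out) = (b, s2, o) →
    s.foldl (bStep op) (bal + c, st.map (· + c), out) = (b + c, s2.map (· + c), o) := by
  intro op s
  induction s with
  | nil =>
    intro bal st out c b s2 o h
    simp at h ⊢
    obtain ⟨e1, e2, e3⟩ := h
    subst e1 e2 e3; simp
  | cons t s ih =>
    intro bal st out c b s2 o h
    simp only [List.foldl_cons] at h ⊢
    rcases h1 : bStep op (bal, st, out) t with ⟨b1, s1, o1⟩
    rw [h1] at h
    rw [bStep_shift op t bal st out c b1 s1 o1 h1]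
    exact ih b1 s1 o1 c b s2 o h





theorem preScan_append : ∀ (op : String) (s1 s2 : List String) (bal : Int) (st : List Int),
    preScan op (s1 ++ s2) bal st = (preScan op s1 bal st).bind (fun p => preScan op s2 p.1 p.2) := by
  intro op s1
  induction s1 with
  | nil => intro s2 bal st; simp [preScan]
  | cons t s1 ih =>
    intro s2 bal st
    simp only [List.cons_append, preScan]
    by_cases h1 : t = op
    · rw [if_pos h1, if_pos h1]
      by_cases hc : op ≠ "!" ∧ st.contains bal
      · rw [if_pos hc, if_pos hc]; simp
      · rw [if_neg hc, if_neg hc]; exact ih s2 bal (bal :: st)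
    · rw [if_neg h1, if_neg h1]
      by_cases h2 : t = "!"
      · rw [if_pos h2, if_pos h2]; apply ih
      · rw [if_neg h2, if_neg h2]
        by_cases h3 : ((st.dropWhile (· == bal + (if t = "(" then 1 else if t = ")" then (-1 : Int) else 0))).contains (bal + (if t = "(" then 1 else if t = ")" then (-1 : Int) else 0))) = true
        · rw [if_pos h3, if_pos h3]; simp
        · rw [if_neg h3, if_neg h3]; apply ih

theorem preScan_run : ∀ (op : String) (s : List String) (bal : Int) (st : List Int) (b : Int) (st' : List Int) (out : List String),
    preScan op s bal st = some (b, st') →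
    ∃ o : List String, s.foldl (bStep op) (bal, st, out) = (b, st', o) := by
  intro op s
  induction s with
  | nil =>
    intro bal st b st' out h
    simp [preScan] at h
    obtain ⟨e1, e2⟩ := h
    subst e1 e2
    exact ⟨out, by simp⟩
  | cons t s ih =>
    intro bal st b st' out h
    simp only [preScan] at h
    simp only [List.foldl_cons]
    by_cases h1 : t = op
    · rw [if_pos h1] at h
      by_cases hc : op ≠ "!" ∧ st.contains bal
      · rw [if_pos hc] at h; exact absurd h (by simp)
      · rw [if_neg hc] at h
        have hb : bStep op (bal, st, out) t = (bal, bal :: st, out ++ ["(", "!"]) := by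
          simp [bStep, if_pos h1]
        rw [hb]
        exact ih bal (bal :: st) b st' _ h
    · rw [if_neg h1] at h
      by_cases h2 : t = "!"
      · rw [if_pos h2] at h
        have hb : bStep op (bal, st, out) t =
            (bal + (if t = "(" then 1 else if t = ")" then (-1 : Int) else 0), st, out ++ [t]) := by
          have h1' : ¬ "!" = op := h2 ▸ h1
          simp [bStep, h1', h2]
        rw [hb]
        exact ih _ st b st' _ h
      · rw [if_neg h2] at h
        by_cases h3 : ((st.dropWhile (· == bal + (if t = "(" then 1 else if t = ")" then (-1 : Int) else 0))).contains (bal + (if t = "(" then 1 else if t = ")" then (-1 : Int) else 0))) = true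
        · rw [if_pos h3] at h; exact absurd h (by simp)
        · rw [if_neg h3] at h
          have hb : bStep op (bal, st, out) t =
              (bal + (if t = "(" then 1 else if t = ")" then (-1 : Int) else 0),
               st.dropWhile (· == bal + (if t = "(" then 1 else if t = ")" then (-1 : Int) else 0)),
               (out ++ [t]) ++ List.replicate (st.takeWhile (· == bal + (if t = "(" then 1 else if t = ")" then (-1 : Int) else 0))).length ")") := by
            simp [bStep, h1, h2, bPop_eq]
          rw [hb]
          exact ih _ _ b st' _ h

theorem fwdSlice_self : ∀ (s : List String) (off : Int) (sl rem : List String),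
    fwdSlice s off = some (sl, rem) → fwdSlice sl off = some (sl, []) := by
  intro s
  induction s with
  | nil => intro off sl rem h; simp [fwdSlice] at h
  | cons t rest ih =>
    intro off sl rem h
    rw [fwdSlice] at h
    by_cases hc : (off + (if t = "(" then 1 else if t = ")" then (-1 : Int) else 0)) = 0 ∧ t ≠ "!"
    · rw [if_pos hc] at h
      simp only [Option.some.injEq, Prod.mk.injEq] at h
      obtain ⟨e1, e2⟩ := h
      subst e2; rw [← e1]
      rw [fwdSlice]
      rw [if_pos hc]
    · rw [if_neg hc] at h
      cases hf : fwdSlice rest (off + (if t = "(" then 1 else if t = ")" then (-1 : Int) else 0)) with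
      | none => rw [hf] at h; simp at h
      | some p =>
        rw [hf] at h
        obtain ⟨sl', rem'⟩ := p
        simp only [Option.some.injEq, Prod.mk.injEq] at h
        obtain ⟨e1, e2⟩ := h
        subst e2; rw [← e1]
        have ihr := ih _ _ _ hf
        rw [fwdSlice, if_neg hc, ihr]

theorem marker_keeps : ∀ (op : String) (s : List String) (bal : Int) (st : List Int) (b : Int) (st' : List Int),
    op ≠ "(" → op ≠ ")" →
    fwdSlice s bal = none → preScan op s bal (st ++ [0]) = some (b, st') → ∃ u, st' = u ++ [0] := by
  intro op s
  induction s with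
  | nil =>
    intro bal st b st' ho1 ho2 hf h
    simp [preScan] at h
    exact ⟨st, h.2.symm⟩
  | cons t rest ih =>
    intro bal st b st' ho1 ho2 hf h
    rw [fwdSlice] at hf
    by_cases hc : (bal + (if t = "(" then 1 else if t = ")" then (-1 : Int) else 0)) = 0 ∧ t ≠ "!"
    · rw [if_pos hc] at hf; simp at hf
    · rw [if_neg hc] at hf
      have hf' : fwdSlice rest (bal + (if t = "(" then 1 else if t = ")" then (-1 : Int) else 0)) = none := by
        cases hx : fwdSlice rest (bal + (if t = "(" then 1 else if t = ")" then (-1 : Int) else 0)) with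
        | none => rfl
        | some p => rw [hx] at hf; obtain ⟨a, c⟩ := p; simp at hf
      simp only [preScan] at h
      by_cases h1 : t = op
      · rw [if_pos h1] at h
        by_cases hcc : op ≠ "!" ∧ (st ++ [0]).contains bal
        · rw [if_pos hcc] at h; exact absurd h (by simp)
        · rw [if_neg hcc] at h
          have hδop : (if t = "(" then (1:Int) else if t = ")" then (-1:Int) else 0) = 0 := by
            subst h1; rw [if_neg ho1, if_neg ho2]
          rw [hδop, add_zero] at hf'
          have : (bal :: (st ++ [0])) = (bal :: st) ++ [0] := by simp
          rw [this] at h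
          exact ih bal (bal :: st) b st' ho1 ho2 hf' h
      · rw [if_neg h1] at h
        by_cases h2 : t = "!"
        · rw [if_pos h2] at h
          exact ih _ st b st' ho1 ho2 hf' h
        · rw [if_neg h2] at h
          have hb' : (bal + (if t = "(" then 1 else if t = ")" then (-1 : Int) else 0)) ≠ 0 := by
            intro hz; exact hc ⟨hz, h2⟩
          have hdw : (st ++ [0]).dropWhile (· == bal + (if t = "(" then 1 else if t = ")" then (-1 : Int) else 0))
              = st.dropWhile (· == bal + (if t = "(" then 1 else if t = ")" then (-1 : Int) else 0)) ++ [0] := by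
            rw [List.dropWhile_append]
            by_cases he : (st.dropWhile (· == bal + (if t = "(" then 1 else if t = ")" then (-1 : Int) else 0))).isEmpty = true
            · rw [if_pos he]
              have he' : st.dropWhile (· == bal + (if t = "(" then 1 else if t = ")" then (-1 : Int) else 0)) = [] := by
                simpa using he
              have h0 : ((0:Int) == bal + (if t = "(" then 1 else if t = ")" then (-1 : Int) else 0)) = false :=
                beq_eq_false_iff_ne.mpr (Ne.symm hb')
              rw [he']
              simp [List.dropWhile, h0]
            · rw [if_neg he]
          rw [hdw] at h
          by_cases h3 : ((st.dropWhile (· == bal + (if t = "(" then 1 else if t = ")" then (-1 : Int) else 0)) ++ [0]).contains (bal + (if t = "(" then 1 else if t = ")" then (-1 : Int) else 0))) = true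
          · rw [if_pos h3] at h; exact absurd h (by simp)
          · rw [if_neg h3] at h
            exact ih _ _ b st' ho1 ho2 hf' h

theorem dwtw_append : ∀ (bal' : Int) (st : List Int), ((0:Int) == bal') = false →
    ((st ++ [0]).dropWhile (· == bal') = st.dropWhile (· == bal') ++ [0] ∧
     (st ++ [0]).takeWhile (· == bal') = st.takeWhile (· == bal')) := by
  intro bal' st h
  induction st with
  | nil => simp [List.dropWhile, List.takeWhile, h]
  | cons x st ih =>
    by_cases hx : (x == bal') = true
    · simp [List.dropWhile, List.takeWhile, hx, ih]
    · simp only [Bool.not_eq_true] at hx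
      simp [List.dropWhile, List.takeWhile, hx]

theorem aux_slice : ∀ (sl : List String) (op : String) (bal : Int) (st : List Int) (r : Int × List Int),
    op ≠ "(" → op ≠ ")" →
    fwdSlice sl bal = some (sl, []) →
    preScan op sl bal (st ++ [0]) = some r →
    r = (0, []) ∧
    preScan op sl bal st = some (0, []) ∧
    ∃ (o : List String),
      sl.foldl (bStep op) (bal, st, []) = (0, [], o) ∧
      sl.foldl (bStep op) (bal, st ++ [0], []) = (0, [], o ++ [")"]) := by
  intro sl
  induction sl with
  | nil => intro op bal st r _ _ h1 _; simp [fwdSlice] at h1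
  | cons t sl' ih =>
    intro op bal st r ho1 ho2 h1 h2
    rw [fwdSlice] at h1
    by_cases hrc : (bal + (if t = "(" then 1 else if t = ")" then (-1 : Int) else 0)) = 0 ∧ t ≠ "!"
    · -- forward_slice returns at this token: last token of the slice, sl' = []
      rw [if_pos hrc] at h1
      simp only [Option.some.injEq, Prod.mk.injEq] at h1
      have hsl' : sl' = [] := by
        have h := h1.1
        cases sl' with
        | nil => rfl
        | cons a b => simp at h
      subst hsl'
      obtain ⟨hz, hne⟩ := hrc
      by_cases h1t : t = op
      · exfalso
        have hδ0 : (if t = "(" then (1:Int) else if t = ")" then (-1:Int) else 0) = 0 := by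
          rw [h1t, if_neg ho1, if_neg ho2]
        rw [hδ0] at hz
        have hbal0 : bal = 0 := by omega
        simp only [preScan] at h2
        rw [if_pos h1t] at h2
        have hcc : op ≠ "!" ∧ ((st ++ [0]).contains bal) = true := by
          refine ⟨h1t ▸ hne, ?_⟩
          subst hbal0; simp
        rw [if_pos hcc] at h2
        exact absurd h2 (by simp)
      · simp only [preScan] at h2
        rw [if_neg h1t, if_neg hne, hz] at h2
        by_cases hdw : st.dropWhile (· == (0:Int)) = []
        · have hd2 : (st ++ [0]).dropWhile (· == (0:Int)) = [] := by
            rw [List.dropWhile_append, if_pos (by simp [hdw])]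
            simp [List.dropWhile]
          rw [hd2, if_neg (by simp)] at h2
          simp only [preScan, Option.some.injEq] at h2
          have htw : st.takeWhile (· == (0:Int)) = st := by
            have h5 := List.takeWhile_append_dropWhile (p := (· == (0:Int))) (l := st)
            rw [hdw] at h5; simpa using h5
          have htw2 : (st ++ [0]).takeWhile (· == (0:Int)) = st ++ [0] := by
            have h5 := List.takeWhile_append_dropWhile (p := (· == (0:Int))) (l := st ++ [0])
            rw [hd2] at h5; simpa using h5
          refine ⟨h2.symm, ?_, ?_⟩
          · simp only [preScan]
            rw [if_neg h1t, if_neg hne, hz, hdw, if_neg (by simp)]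
          · refine ⟨[t] ++ List.replicate st.length ")", ?_, ?_⟩
            · simp only [List.foldl_cons, List.foldl_nil]
              simp [bStep, h1t, hne, bPop_eq, hz, hdw, htw]
            · simp only [List.foldl_cons, List.foldl_nil]
              simp [bStep, h1t, hne, bPop_eq, hz, hd2, htw2, List.replicate_succ']
        · exfalso
          cases hdd : st.dropWhile (· == (0:Int)) with
          | nil => exact hdw hdd
          | cons x u =>
            have hd2 : (st ++ [0]).dropWhile (· == (0:Int)) = x :: u ++ [0] := by
              rw [List.dropWhile_append, if_neg (by simp [hdd]), hdd]
            rw [hd2] at h2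
            rw [if_pos (by simp)] at h2
            exact absurd h2 (by simp)
    · -- forward_slice continues past this token
      rw [if_neg hrc] at h1
      have hfs : fwdSlice sl' (bal + (if t = "(" then 1 else if t = ")" then (-1 : Int) else 0)) = some (sl', []) := by
        cases hx : fwdSlice sl' (bal + (if t = "(" then 1 else if t = ")" then (-1 : Int) else 0)) with
        | none => rw [hx] at h1; simp at h1
        | some p =>
          rw [hx] at h1
          obtain ⟨a, c⟩ := p
          simp only [Option.some.injEq, Prod.mk.injEq, List.cons.injEq] at h1
          obtain ⟨⟨_, e1⟩, e2⟩ := h1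
          subst e1; subst e2; rfl
      by_cases h1t : t = op
      · have hδ0 : (if t = "(" then (1:Int) else if t = ")" then (-1:Int) else 0) = 0 := by
          rw [h1t, if_neg ho1, if_neg ho2]
        rw [hδ0, add_zero] at hfs
        simp only [preScan] at h2
        rw [if_pos h1t] at h2
        by_cases hcc : op ≠ "!" ∧ ((st ++ [0]).contains bal) = true
        · rw [if_pos hcc] at h2; exact absurd h2 (by simp)
        · rw [if_neg hcc] at h2
          have hrw : (bal :: (st ++ [0])) = (bal :: st) ++ [0] := by simp
          rw [hrw] at h2
          obtain ⟨hr, hps, o', hu, hm⟩ := ih op bal (bal :: st) r ho1 ho2 hfs h2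
          refine ⟨hr, ?_, ?_⟩
          · simp only [preScan]
            rw [if_pos h1t]
            have hcc' : ¬(op ≠ "!" ∧ (st.contains bal) = true) := by
              intro hx
              exact hcc ⟨hx.1, by have h6 := hx.2; simp at h6 ⊢; exact Or.inl h6⟩
            rw [if_neg hcc']
            exact hps
          · have hb : bStep op (bal, st, []) t = (bal, bal :: st, ["(", "!"]) := by
              simp [bStep, h1t]
            have hbm : bStep op (bal, st ++ [0], []) t = (bal, bal :: (st ++ [0]), ["(", "!"]) := by
              simp [bStep, h1t]
            refine ⟨["(", "!"] ++ o', ?_, ?_⟩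
            · simp only [List.foldl_cons]
              rw [hb]
              exact run_out op sl' bal (bal :: st) ["(", "!"] 0 [] o' hu
            · simp only [List.foldl_cons]
              rw [hbm, hrw]
              rw [run_out op sl' bal ((bal :: st) ++ [0]) ["(", "!"] 0 [] (o' ++ [")"]) hm]
              simp
      · by_cases h2t : t = "!"
        · have hδ0 : (if t = "(" then (1:Int) else if t = ")" then (-1:Int) else 0) = 0 := by
            rw [h2t]; simp
          rw [hδ0, add_zero] at hfs
          simp only [preScan] at h2
          rw [if_neg h1t, if_pos h2t, hδ0, add_zero] at h2
          obtain ⟨hr, hps, o', hu, hm⟩ := ih op bal st r ho1 ho2 hfs h2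
          refine ⟨hr, ?_, ?_⟩
          · simp only [preScan]
            rw [if_neg h1t, if_pos h2t, hδ0, add_zero]
            exact hps
          · have hb : ∀ stk : List Int, bStep op (bal, stk, ([] : List String)) t = (bal, stk, [t]) := by
              intro stk
              have h1x : ¬ "!" = op := h2t ▸ h1t
              rw [h2t]
              simp [bStep, h1x]
            refine ⟨[t] ++ o', ?_, ?_⟩
            · simp only [List.foldl_cons]
              rw [hb st]
              exact run_out op sl' bal st [t] 0 [] o' hu
            · simp only [List.foldl_cons]
              rw [hb (st ++ [0])]
              rw [run_out op sl' bal (st ++ [0]) [t] 0 [] (o' ++ [")"]) hm]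
              simp
        · have hb' : bal + (if t = "(" then 1 else if t = ")" then (-1 : Int) else 0) ≠ 0 :=
            fun hzz => hrc ⟨hzz, h2t⟩
          have h0f : ((0:Int) == bal + (if t = "(" then 1 else if t = ")" then (-1 : Int) else 0)) = false :=
            beq_eq_false_iff_ne.mpr (Ne.symm hb')
          obtain ⟨hdw, htw⟩ := dwtw_append (bal + (if t = "(" then 1 else if t = ")" then (-1 : Int) else 0)) st h0f
          simp only [preScan] at h2
          rw [if_neg h1t, if_neg h2t, hdw] at h2
          by_cases h3 : ((st.dropWhile (· == bal + (if t = "(" then 1 else if t = ")" then (-1 : Int) else 0)) ++ [0]).contains (bal + (if t = "(" then 1 else if t = ")" then (-1 : Int) else 0))) = true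
          · rw [if_pos h3] at h2; exact absurd h2 (by simp)
          · rw [if_neg h3] at h2
            obtain ⟨hr, hps, o', hu, hm⟩ := ih op _ (st.dropWhile (· == bal + (if t = "(" then 1 else if t = ")" then (-1 : Int) else 0))) r ho1 ho2 hfs h2
            refine ⟨hr, ?_, ?_⟩
            · simp only [preScan]
              rw [if_neg h1t, if_neg h2t]
              have h3' : ¬(((st.dropWhile (· == bal + (if t = "(" then 1 else if t = ")" then (-1 : Int) else 0))).contains (bal + (if t = "(" then 1 else if t = ")" then (-1 : Int) else 0))) = true) := by
                intro hx
                apply h3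
                simp at hx ⊢
                exact Or.inl hx
              rw [if_neg h3']
              exact hps
            · have hbu : bStep op (bal, st, []) t =
                  (bal + (if t = "(" then 1 else if t = ")" then (-1 : Int) else 0),
                   st.dropWhile (· == bal + (if t = "(" then 1 else if t = ")" then (-1 : Int) else 0)),
                   [t] ++ List.replicate (st.takeWhile (· == bal + (if t = "(" then 1 else if t = ")" then (-1 : Int) else 0))).length ")") := by
                simp [bStep, h1t, h2t, bPop_eq]
              have hbm : bStep op (bal, st ++ [0], []) t =
                  (bal + (if t = "(" then 1 else if t = ")" then (-1 : Int) else 0),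
                   st.dropWhile (· == bal + (if t = "(" then 1 else if t = ")" then (-1 : Int) else 0)) ++ [0],
                   [t] ++ List.replicate (st.takeWhile (· == bal + (if t = "(" then 1 else if t = ")" then (-1 : Int) else 0))).length ")") := by
                simp [bStep, h1t, h2t, bPop_eq, hdw, htw]
              refine ⟨([t] ++ List.replicate (st.takeWhile (· == bal + (if t = "(" then 1 else if t = ")" then (-1 : Int) else 0))).length ")") ++ o', ?_, ?_⟩
              · simp only [List.foldl_cons]
                rw [hbu]
                exact run_out op sl' _ _ _ 0 [] o' hu
              · simp only [List.foldl_cons]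
                rw [hbm]
                rw [run_out op sl' _ _ _ 0 [] (o' ++ [")"]) hm]
                simp

theorem contains_shift : ∀ (st : List Int) (bal c : Int),
    ((st.map (· + c)).contains (bal + c)) = (st.contains bal) := by
  intro st bal c
  by_cases h : bal ∈ st
  · have h2 : bal + c ∈ st.map (· + c) := List.mem_map.mpr ⟨bal, h, rfl⟩
    simp [h, h2]
  · have h2 : bal + c ∉ st.map (· + c) := by
      intro hx
      obtain ⟨x, hx1, hx2⟩ := List.mem_map.mp hx
      have hxb : x = bal := by omega
      exact h (hxb ▸ hx1)
    simp [h, h2]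

theorem preScan_shift : ∀ (op : String) (s : List String) (bal : Int) (st : List Int) (c : Int),
    preScan op s (bal + c) (st.map (· + c)) =
      (preScan op s bal st).map (fun p => (p.1 + c, p.2.map (· + c))) := by
  intro op s
  induction s with
  | nil => intro bal st c; simp [preScan]
  | cons t s ih =>
    intro bal st c
    simp only [preScan]
    by_cases h1 : t = op
    · rw [if_pos h1, if_pos h1]
      by_cases hcc : op ≠ "!" ∧ (st.contains bal) = true
      · have hcc' : op ≠ "!" ∧ (((st.map (· + c)).contains (bal + c)) = true) := by
          rw [contains_shift]; exact hcc
        rw [if_pos hcc, if_pos hcc']; simp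
      · have hcc' : ¬(op ≠ "!" ∧ (((st.map (· + c)).contains (bal + c)) = true)) := by
          rw [contains_shift]; exact hcc
        rw [if_neg hcc, if_neg hcc']
        have : (bal + c) :: st.map (· + c) = (bal :: st).map (· + c) := by simp
        rw [this]
        exact ih bal (bal :: st) c
    · rw [if_neg h1, if_neg h1]
      have harr : bal + c + (if t = "(" then 1 else if t = ")" then (-1 : Int) else 0)
          = (bal + (if t = "(" then 1 else if t = ")" then (-1 : Int) else 0)) + c := by omega
      by_cases h2 : t = "!"
      · rw [if_pos h2, if_pos h2, harr]
        exact ih _ st c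
      · rw [if_neg h2, if_neg h2, harr]
        have hdwm : (st.map (· + c)).dropWhile (· == (bal + (if t = "(" then 1 else if t = ")" then (-1 : Int) else 0)) + c)
            = (st.dropWhile (· == bal + (if t = "(" then 1 else if t = ")" then (-1 : Int) else 0))).map (· + c) := by
          rw [List.dropWhile_map, beq_shift]
        rw [hdwm]
        by_cases h3 : ((st.dropWhile (· == bal + (if t = "(" then 1 else if t = ")" then (-1 : Int) else 0))).contains (bal + (if t = "(" then 1 else if t = ")" then (-1 : Int) else 0))) = true
        · have h3' := (contains_shift _ (bal + (if t = "(" then 1 else if t = ")" then (-1 : Int) else 0)) c).trans h3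
          rw [if_pos h3, if_pos h3']; simp
        · have h3' : ¬ _ := fun hx => h3 ((contains_shift (st.dropWhile (· == bal + (if t = "(" then 1 else if t = ")" then (-1 : Int) else 0))) (bal + (if t = "(" then 1 else if t = ")" then (-1 : Int) else 0)) c).symm.trans hx)
          rw [if_neg h3, if_neg h3']
          exact ih _ _ c

theorem alt_cons_ne (op t : String) (rest : List String) (h : ¬ t = op) :
    around_unary_op_alt (t :: rest) op = t :: around_unary_op_alt rest op := by
  unfold around_unary_op_alt
  simp only [List.foldl_cons]
  have hb : bStep op (0, [], []) t =
      ((if t = "(" then 1 else if t = ")" then (-1 : Int) else 0), [], [t]) := by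
    by_cases h2 : t = "!"
    · have h' : ¬ "!" = op := h2 ▸ h
      simp [bStep, h', h2]
    · simp [bStep, h, h2, bPop]
  rw [hb]
  rcases h0 : List.foldl (bStep op) (0, [], []) rest with ⟨b0, s0, o0⟩
  have hs := run_shift op rest 0 [] [] (if t = "(" then 1 else if t = ")" then (-1 : Int) else 0) b0 s0 o0 h0
  simp only [List.map_nil, zero_add] at hs
  rw [run_out op rest _ [] [t] _ _ _ hs]
  simp

theorem A_nil (op : String) : around_unary_op [] op = [] := by
  rw [around_unary_op]

theorem A_cons_ne (t : String) (rest : List String) (op : String) (h : ¬ t = op) :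
    around_unary_op (t :: rest) op = t :: around_unary_op rest op := by
  rw [around_unary_op]
  simp only [if_neg h]

theorem A_cons_op (op : String) (rest sl rem : List String) (hf : fwdSlice rest 0 = some (sl, rem)) :
    around_unary_op (op :: rest) op =
      ["(", "!"] ++ around_unary_op sl op ++ [")"] ++ around_unary_op rem op := by
  rw [around_unary_op, if_pos rfl]
  split
  · rename_i sl' rem' h'
    rw [hf] at h'
    simp only [Option.some.injEq, Prod.mk.injEq] at h'
    rw [h'.1, h'.2]
  · rename_i h'
    rw [hf] at h'
    simp at h'

theorem main_equiv : ∀ (n : Nat) (s : List String) (op : String), op ≠ "(" → op ≠ ")" →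
    s.length ≤ n → (preScan op s 0 []).map Prod.snd = some [] →
    around_unary_op s op = around_unary_op_alt s op := by
  intro n
  induction n with
  | zero =>
    intro s op ho1 ho2 hl hp
    have hso : s = [] := List.length_eq_zero_iff.mp (Nat.le_zero.mp hl)
    subst hso
    rw [A_nil]
    simp [around_unary_op_alt]
  | succ n ihn =>
    intro s op ho1 ho2 hl hp
    cases s with
    | nil =>
      rw [A_nil]
      simp [around_unary_op_alt]
    | cons t rest =>
    by_cases h1t : t = op
    · subst h1t
      -- peel the op token off the precondition scan
      simp only [preScan] at hp
      rw [if_pos trivial, if_neg (by simp)] at hp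
      rcases hps : preScan t rest 0 [0] with _ | ⟨b, stf⟩
      · rw [hps] at hp; simp at hp
      · rw [hps] at hp
        simp only [Option.map_some, Option.some.injEq] at hp
        have hstf : stf = [] := hp
        subst hstf
        cases hf : fwdSlice rest 0 with
        | none =>
          exfalso
          obtain ⟨u, hu⟩ := marker_keeps t rest 0 [] b [] ho1 ho2 hf (by simpa using hps)
          simp at hu
        | some p =>
          obtain ⟨sl, rem⟩ := p
          obtain ⟨hsp, hsn⟩ := fwdSlice_split rest 0 sl rem hf
          have hself := fwdSlice_self rest 0 sl rem hf
          -- split the scan at the slice boundary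
          have hap : preScan t (sl ++ rem) 0 [0] = some (b, []) := by rw [← hsp]; exact hps
          rw [preScan_append] at hap
          rcases hmid : preScan t sl 0 [0] with _ | ⟨mb, mst⟩
          · rw [hmid] at hap; simp at hap
          · rw [hmid] at hap
            simp only [Option.bind_some] at hap
            obtain ⟨hreq, hpsl, o, hru, hrm⟩ :=
              aux_slice sl t 0 [] (mb, mst) ho1 ho2 hself (by simpa using hmid)
            have hmb : mb = 0 := congrArg Prod.fst hreq
            have hmst : mst = [] := congrArg Prod.snd hreq
            subst hmb; subst hmst
            -- lengths
            have hlen : sl.length + rem.length = rest.length := by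
              rw [hsp, List.length_append]
            have hlsl : sl.length ≤ n := by
              simp only [List.length_cons] at hl; omega
            have hlrem : rem.length ≤ n := by
              have : sl.length ≠ 0 := by simpa using hsn
              simp only [List.length_cons] at hl; omega
            -- induction hypotheses
            have ihsl := ihn sl t ho1 ho2 hlsl (by rw [hpsl]; rfl)
            have ihrem := ihn rem t ho1 ho2 hlrem (by rw [hap]; rfl)
            -- B side: run the pass over op, then the slice, then the remainder
            rw [A_cons_op t rest sl rem hf, ihsl, ihrem]
            unfold around_unary_op_alt
            simp only [List.foldl_cons]
            have hb0 : bStep t (0, [], []) t = (0, [0], ["(", "!"]) := by simp [bStep]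
            rw [hb0, hsp, List.foldl_append]
            have hslice : List.foldl (bStep t) (0, [0], ["(", "!"]) sl = (0, [], ["(", "!"] ++ (o ++ [")"])) := by
              have := run_out t sl 0 [0] ["(", "!"] 0 [] (o ++ [")"]) (by simpa using hrm)
              simpa using this
            rw [hslice]
            rcases hR : List.foldl (bStep t) (0, [], []) rem with ⟨rb, rs, ro⟩
            have hrs : rs = [] := by
              obtain ⟨o2, ho2'⟩ := preScan_run t rem 0 [] b [] [] hap
              rw [hR] at ho2'
              exact (congrArg (fun q => q.2.1) ho2')
            rw [run_out t rem 0 [] (["(", "!"] ++ (o ++ [")"])) rb rs ro hR]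
            simp [hru, hrs]
    · -- ordinary token: peel it on both sides and shift the balance
      have hA := A_cons_ne t rest op h1t
      have hB := alt_cons_ne op t rest h1t
      rw [hA, hB]
      -- precondition for rest
      simp only [preScan] at hp
      rw [if_neg h1t] at hp
      have hp' : (preScan op rest (0 + (if t = "(" then 1 else if t = ")" then (-1 : Int) else 0)) []).map Prod.snd = some [] := by
        by_cases h2 : t = "!"
        · rw [if_pos h2] at hp; simpa using hp
        · rw [if_neg h2] at hp
          rw [if_neg (by simp)] at hp
          simpa [List.dropWhile] using hp
      have hsh := preScan_shift op rest 0 [] (if t = "(" then 1 else if t = ")" then (-1 : Int) else 0)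
      simp only [List.map_nil] at hsh
      rw [hsh] at hp'
      rcases hq : preScan op rest 0 [] with _ | ⟨qb, qs⟩
      · rw [hq] at hp'; simp at hp'
      · rw [hq] at hp'
        simp only [Option.map_map, Option.map_some, Option.some.injEq] at hp'
        have hqs : qs = [] := by
          simpa using hp'
        have := ihn rest op ho1 ho2 (by simp only [List.length_cons] at hl; omega)
          (by rw [hq, hqs]; rfl)
        rw [this]

theorem A_no_op : ∀ (s : List String) (op : String), op ∉ s → around_unary_op s op = s := by
  intro s
  induction s with
  | nil => intro op _; exact A_nil op
  | cons t rest ih =>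
    intro op h
    have h1 : ¬ t = op := fun e => h (by simp [e])
    rw [A_cons_ne t rest op h1, ih op (by simp at h; exact h.2)]

theorem alt_no_op : ∀ (s : List String) (op : String), op ∉ s → around_unary_op_alt s op = s := by
  intro s
  induction s with
  | nil => intro op _; simp [around_unary_op_alt]
  | cons t rest ih =>
    intro op h
    have h1 : ¬ t = op := fun e => h (by simp [e])
    rw [alt_cons_ne op t rest h1, ih op (by simp at h; exact h.2)]

-- ===== VERDICT (by name: the statement is the Claim_ definition above) =====
theorem around_unary_op_spec : Claim_equal_around_unary_op := by
  intro sentence op _hdom hpre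
  obtain ⟨hd, h3⟩ := hpre
  show around_unary_op sentence op = around_unary_op_alt sentence op
  rcases hd with ⟨h1, h2⟩ | hno
  · exact main_equiv sentence.length sentence op h1 h2 le_rfl h3
  · rw [A_no_op sentence op hno, alt_no_op sentence op hno]
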